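-- pv_equiv track=rewrite | github.com/Kansallisarkisto-AI/rfdetr_trocr_pipeline | xml_koodit.py | get_region_ids
-- ===== SOURCE A (Python) =====
-- def get_region_ids(data):
--     """Creates region ids based on the region names."""
--     region_names = [region_dict['region_name'] for region_dict in data]
--     unique_names = list(set(region_names))
--     ind_dict = {name: 0 for name in unique_names}
--     new_names = []
--     for i, name in enumerate(region_names):
--         ind = ind_dict[name]
--         new_name = name + '_' + str(ind)
--         new_names.append(new_name)
--         ind_dict[name] = ind_dict.get(name, 0) + 1
--     return new_names
-- ===== SOURCE B (Python) =====
-- def get_region_ids(data):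
--     """Creates region ids based on the region names."""
--     names = [region_dict['region_name'] for region_dict in data]
--     positions = {}
--     for i, name in enumerate(names):
--         positions.setdefault(name, []).append(i)
--     result = [None] * len(names)
--     for name, idxs in positions.items():
--         for k, i in enumerate(idxs):
--             result[i] = name + '_' + str(k)
--     return result
-- ===== Notes on version B (the rewrite author's own statement) =====
-- stated objective: alternative
-- what changed: Instead of streaming once with a mutable per-name counter, B groups: one pass builds a dict from each name to the list of indices where it occurs, then a fill pass allocates the output and writes result[i] = name+'_'+str(k) for the k-th index of each group.
import Mathlib
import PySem

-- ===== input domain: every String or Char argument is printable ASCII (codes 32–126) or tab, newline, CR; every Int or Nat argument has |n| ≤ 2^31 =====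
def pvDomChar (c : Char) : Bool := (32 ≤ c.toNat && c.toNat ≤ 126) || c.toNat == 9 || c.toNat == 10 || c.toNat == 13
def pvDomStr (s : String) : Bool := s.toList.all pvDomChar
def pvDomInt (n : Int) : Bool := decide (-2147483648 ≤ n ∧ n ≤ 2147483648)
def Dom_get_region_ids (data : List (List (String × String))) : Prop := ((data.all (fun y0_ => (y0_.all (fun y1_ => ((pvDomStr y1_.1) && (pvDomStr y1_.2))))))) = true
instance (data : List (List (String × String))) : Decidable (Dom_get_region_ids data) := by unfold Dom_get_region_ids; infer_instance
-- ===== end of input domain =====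

-- B groups indices per name in a dict, allocates the output, and fills it group by group
-- (alternative decomposition; A streams once with a mutable per-name counter). Equal return value on Pre_.


-- ===== PORT A =====
def get_region_ids (data : List (List (String × String))) : List String :=
  let region_names := data.map (fun rd => ((PySem.Dict.mk rd).get? "region_name").getD "")
  let unique_names := PySem.Set.ofList region_names
  let ind_dict : PySem.Dict String Int :=
    unique_names.foldl (fun d name => d.insert name 0) PySem.Dict.empty
  ((PySem.List.enumerate region_names).foldl
    (fun (st : List String × PySem.Dict String Int) p =>
      let ind := st.2.getD p.2 0      -- ind_dict[p.2]; the key is always present (initialised from set(region_names))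
      let new_name := p.2 ++ "_" ++ PySem.Int.toStr ind
      (st.1 ++ [new_name], st.2.insert p.2 (st.2.getD p.2 0 + 1)))
    ([], ind_dict)).1

-- ===== PORT B =====
-- positions.setdefault(name, []).append(i)  ==  modify name [] (· ++ [i]); result[i] = …  ==  List.set
-- (indices stored in positions are the nonnegative enumerate indices, so .toNat is exact here;
--  the placeholder "" stands for Python's None — every slot is overwritten before return).
def get_region_ids_alt (data : List (List (String × String))) : List String :=
  let names := data.map (fun rd => ((PySem.Dict.mk rd).get? "region_name").getD "")
  let positions : PySem.Dict String (List Int) :=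
    (PySem.List.enumerate names).foldl
      (fun d p => d.modify p.2 [] (· ++ [p.1])) PySem.Dict.empty
  let result0 : List String := List.replicate names.length ""
  positions.items.foldl
    (fun res e =>
      (PySem.List.enumerate e.2).foldl
        (fun r q => r.set q.2.toNat (e.1 ++ "_" ++ PySem.Int.toStr q.1)) res)
    result0

-- ===== PRECONDITION & SPEC =====
-- Pre_ excludes exactly the inputs where some region dict lacks the key 'region_name': there Python A raises KeyError.
def Pre_get_region_ids (data : List (List (String × String))) : Prop :=
  (data.all (fun rd => rd.any (fun q => q.1 == "region_name"))) = true
instance (data : List (List (String × String))) : Decidable (Pre_get_region_ids data) := by unfold Pre_get_region_ids; infer_instance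
def pvWitness_get_region_ids : (List (List (String × String))) :=
  [[("region_name", "a")], [("region_name", "b")], [("region_name", "a")]]
def Spec_get_region_ids (data : List (List (String × String))) (out : List String) : Prop := out = get_region_ids_alt data
instance (data : List (List (String × String))) (out : List String) : Decidable (Spec_get_region_ids data out) := by unfold Spec_get_region_ids; infer_instance

-- ===== CLAIM (what is proved, stated in full; the proofs are below) =====
def Claim_equal_get_region_ids : Prop := ∀ (data : List (List (String × String))), Dom_get_region_ids data → Pre_get_region_ids data → Spec_get_region_ids data (get_region_ids data)

-- ===== LEMMAS AND PROOFS =====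

-- the common target: name_i suffixed by the count of prior occurrences
def specGo (p l : List String) : List String :=
  match l with
  | [] => []
  | n :: rest => (n ++ "_" ++ PySem.Int.toStr ((p.count n : Nat) : Int)) :: specGo (p ++ [n]) rest

-- indices (offset s) at which nm occurs in l
def posA (l : List String) (s : Int) (nm : String) : List Int :=
  ((PySem.List.enumerate l s).filter (fun q => q.2 == nm)).map (·.1)

-- ---- A side (counter loop = specGo) ----
lemma init_dict_getD (l : List String) (d : PySem.Dict String Int)
    (hd : ∀ n, d.getD n 0 = 0) (n : String) :
    (l.foldl (fun d name => d.insert name 0) d).getD n 0 = 0 := by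
  induction l generalizing d with
  | nil => exact hd n
  | cons x xs ih =>
      simp only [List.foldl_cons]
      exact ih _ (fun m => by rw [PySem.Dict.getD_insert]; split <;> simp [hd])

lemma loopA_eq (l p : List String) (s : Int) (d : PySem.Dict String Int) (acc : List String)
    (hd : ∀ n, d.getD n 0 = ((p.count n : Nat) : Int)) :
    ((PySem.List.enumerate l s).foldl
      (fun (st : List String × PySem.Dict String Int) q =>
        (st.1 ++ [q.2 ++ "_" ++ PySem.Int.toStr (st.2.getD q.2 0)],
         st.2.insert q.2 (st.2.getD q.2 0 + 1)))
      (acc, d)).1 = acc ++ specGo p l := by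
  induction l generalizing p s d acc with
  | nil => simp [PySem.List.enumerate_nil, specGo]
  | cons n rest ih =>
      rw [PySem.List.enumerate_cons]
      simp only [List.foldl_cons]
      rw [ih (p ++ [n]) (s + 1) _ _ ?_]
      · simp [specGo, hd n]
      · intro m
        rw [PySem.Dict.getD_insert]
        split
        · subst m; simp [hd n, List.count_append]
        · rename_i hne
          rw [hd m]
          simp [List.count_append, List.count_singleton]
          exact fun h => hne h.symm

-- ---- specGo = the pointwise target T ----
def targetT (l : List String) : List String :=
  (PySem.List.enumerate l).map
    (fun q => q.2 ++ "_" ++ PySem.Int.toStr (((l.take q.1.toNat).count q.2 : Nat) : Int))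

lemma mapT_eq (l p : List String) :
    (PySem.List.enumerate l (p.length : Int)).map
      (fun q => q.2 ++ "_" ++ PySem.Int.toStr ((((p ++ l).take q.1.toNat).count q.2 : Nat) : Int))
      = specGo p l := by
  induction l generalizing p with
  | nil => simp [PySem.List.enumerate_nil, specGo]
  | cons n rest ih =>
      rw [PySem.List.enumerate_cons]
      simp only [List.map_cons, specGo]
      refine congrArg₂ List.cons ?_ ?_
      · simp
      · have h1 : ((p.length : Int) + 1) = (((p ++ [n]).length : Nat) : Int) := by simp
        have h2 : p ++ n :: rest = (p ++ [n]) ++ rest := by simp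
        rw [h1, h2, ih (p ++ [n])]

lemma targetT_eq_specGo (l : List String) : targetT l = specGo [] l := by
  have := mapT_eq l []
  simpa [targetT, PySem.List.enumerate] using this

-- ---- B side: positions dict characterisation ----
lemma positions_getD (l : List String) (nm : String) :
    (((PySem.List.enumerate l).foldl
        (fun (d : PySem.Dict String (List Int)) p => d.modify p.2 [] (· ++ [p.1]))
        PySem.Dict.empty).getD nm [])
      = posA l 0 nm := by
  have h : (PySem.List.enumerate l).foldl
        (fun (d : PySem.Dict String (List Int)) p => d.modify p.2 [] (· ++ [p.1]))
        PySem.Dict.empty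
      = ((PySem.List.enumerate l).map (fun p => (p.2, p.1))).foldl
        (fun (d : PySem.Dict String (List Int)) p => d.modify p.1 [] (· ++ [p.2]))
        PySem.Dict.empty := by
    rw [List.foldl_map]
  rw [h, PySem.Dict.getD_foldl_modify_append]
  simp [posA, PySem.Dict.getD_empty, List.filter_map, List.map_map, Function.comp_def]

lemma positions_keys (l : List String) :
    (((PySem.List.enumerate l).foldl
        (fun (d : PySem.Dict String (List Int)) p => d.modify p.2 [] (· ++ [p.1]))
        PySem.Dict.empty).keys)
      = PySem.Set.ofList l := by
  have h := PySem.Dict.keys_foldl_modify_key (PySem.List.enumerate l)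
    (fun p => p.2) ([] : List Int) (fun _ p v => v ++ [p.1]) PySem.Dict.empty
  simpa [PySem.List.map_snd_enumerate, PySem.Set.update_nil_left, PySem.Dict.keys_empty] using h

lemma positions_items (l : List String) :
    (((PySem.List.enumerate l).foldl
        (fun (d : PySem.Dict String (List Int)) p => d.modify p.2 [] (· ++ [p.1]))
        PySem.Dict.empty).items)
      = (PySem.Set.ofList l).map (fun nm => (nm, posA l 0 nm)) := by
  rw [PySem.Dict.items_eq_map_keys _ ?nd ([] : List Int)]
  · rw [positions_keys]
    exact List.map_congr_left (fun nm _ => by rw [positions_getD])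
  · rw [positions_keys]; exact PySem.Set.nodup_ofList l

-- ---- posA characterisations ----
lemma posA_get (l : List String) (s : Int) (nm : String) (k : Nat) (i : Int)
    (h : (posA l s nm)[k]? = some i) :
    ∃ j : Nat, j < l.length ∧ i = s + j ∧ l[j]! = nm ∧ (l.take j).count nm = k := by
  induction l generalizing s k with
  | nil => simp [posA, PySem.List.enumerate_nil] at h
  | cons x xs ih =>
      rw [posA, PySem.List.enumerate_cons] at h
      by_cases hx : x = nm
      · subst hx
        simp only [List.filter_cons, beq_self_eq_true, if_true, List.map_cons] at h
        match k with
        | 0 =>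
            simp at h
            exact ⟨0, by simp, by omega, by simp, by simp⟩
        | k + 1 =>
            simp only [List.getElem?_cons_succ] at h
            obtain ⟨j, hj, hi, hnm, hc⟩ := ih (s + 1) k h
            refine ⟨j + 1, by simpa using hj, by omega, by simpa using hnm, ?_⟩
            simp [List.take_succ_cons, hc]
      · simp only [List.filter_cons, beq_iff_eq, hx, if_false] at h
        obtain ⟨j, hj, hi, hnm, hc⟩ := ih (s + 1) k h
        refine ⟨j + 1, by simpa using hj, by omega, by simpa using hnm, ?_⟩
        simp [List.take_succ_cons, hc, hx]

lemma posA_mem (l : List String) (s : Int) (j : Nat) (hj : j < l.length) :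
    (s + j) ∈ posA l s (l[j]) := by
  have hmem : ((s + j : Int), l[j]) ∈ PySem.List.enumerate l s := by
    exact (PySem.List.mem_enumerate_iff _ _ _).mpr ⟨j, hj, rfl⟩
  have : ((s + j : Int), l[j]) ∈ (PySem.List.enumerate l s).filter (fun q => q.2 == l[j]) :=
    List.mem_filter.mpr ⟨hmem, by simp⟩
  exact List.mem_map.mpr ⟨_, this, rfl⟩

-- ---- writes lemma ----
lemma foldl_set_eq (ws : List (Nat × String)) (T : List String) :
    ∀ res : List String, res.length = T.length →
    (∀ w ∈ ws, T[w.1]? = some w.2) →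
    ∀ j : Nat, (ws.foldl (fun r w => r.set w.1 w.2) res)[j]? =
      if ws.any (fun w => w.1 == j) then T[j]? else res[j]? := by
  induction ws with
  | nil => intro res _ _ j; simp
  | cons w ws ih =>
      intro res hlen hT j
      simp only [List.foldl_cons, List.any_cons]
      have hw := hT w (by simp)
      have hwlt : w.1 < res.length := by
        rw [hlen]; exact List.getElem?_eq_some_iff.mp hw |>.1
      rw [ih (res.set w.1 w.2) (by simpa using hlen) (fun v hv => hT v (by simp [hv]))]
      by_cases hws : ws.any (fun v => v.1 == j)
      · simp [hws]
      · by_cases hj : w.1 = j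
        · subst hj
          simp [hws, List.getElem?_set_self hwlt, hw]
        · simp [hws, hj, List.getElem?_set_ne hj]

-- nested group fold = flat fold over all writes
lemma fill_flatten (G : List (String × List Int)) (res : List String) :
    G.foldl
      (fun res e =>
        (PySem.List.enumerate e.2).foldl
          (fun r q => r.set q.2.toNat (e.1 ++ "_" ++ PySem.Int.toStr q.1)) res)
      res
    = (G.flatMap (fun e => (PySem.List.enumerate e.2).map
         (fun q => (q.2.toNat, e.1 ++ "_" ++ PySem.Int.toStr q.1)))).foldl
        (fun r w => r.set w.1 w.2) res := by
  induction G generalizing res with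
  | nil => simp
  | cons e G ih =>
      simp only [List.foldl_cons, List.flatMap_cons, List.foldl_append, List.foldl_map]
      rw [ih]

-- ===== VERDICT (by name: the statement is the Claim_ definition above) =====
theorem get_region_ids_spec : Claim_equal_get_region_ids := by
  intro data _ _
  show get_region_ids data = get_region_ids_alt data
  simp only [get_region_ids, get_region_ids_alt]
  set names := data.map (fun rd => ((PySem.Dict.mk rd).get? "region_name").getD "") with hn
  -- A = specGo [] names
  have hd0 : ∀ n : String,
      ((PySem.Set.ofList names).foldl (fun d name => d.insert name (0 : Int)) PySem.Dict.empty).getD n 0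
        = ((List.count n ([] : List String) : Nat) : Int) :=
    init_dict_getD _ _ (fun n => by simp [PySem.Dict.getD_empty])
  have hA := loopA_eq names [] 0 _ [] hd0
  simp only [List.nil_append] at hA
  rw [hA, ← targetT_eq_specGo]
  -- B = targetT names
  rw [positions_items, fill_flatten]
  set ws := ((PySem.Set.ofList names).map (fun nm => (nm, posA names 0 nm))).flatMap
      (fun e => (PySem.List.enumerate e.2).map
         (fun q => (q.2.toNat, e.1 ++ "_" ++ PySem.Int.toStr q.1))) with hws
  have hTlen : (targetT names).length = names.length := by
    simp [targetT, PySem.List.length_enumerate]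
  have hmatch : ∀ w ∈ ws, (targetT names)[w.1]? = some w.2 := by
    intro w hw
    rw [hws] at hw
    obtain ⟨e, he, hw2⟩ := List.mem_flatMap.mp hw
    obtain ⟨q, hq, rfl⟩ := List.mem_map.mp hw2
    obtain ⟨nm, _, rfl⟩ := List.mem_map.mp he
    obtain ⟨k, hk, rfl⟩ := (PySem.List.mem_enumerate_iff _ _ _).mp hq
    simp only []
    have hget : (posA names 0 nm)[k]? = some ((posA names 0 nm)[k]) := List.getElem?_eq_getElem hk
    obtain ⟨j, hj, hi, hnm, hc⟩ := posA_get names 0 nm k _ hget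
    have hij : (posA names 0 nm)[k] = (j : Int) := by omega
    have hnmj : names[j]! = nm := hnm
    have hnmj' : names[j] = nm := by
      rwa [List.getElem!_eq_getElem?_getD, List.getElem?_eq_getElem hj, Option.getD_some] at hnmj
    rw [hij]
    simp only [Int.toNat_natCast, targetT]
    rw [List.getElem?_map, PySem.List.getElem?_enumerate, List.getElem?_eq_getElem hj]
    simp [hnmj', hc]
  have hcover : ∀ j : Nat, j < names.length → ws.any (fun w => w.1 == j) := by
    intro j hj
    have hmemp : ((0 : Int) + j) ∈ posA names 0 (names[j]) := posA_mem names 0 j hj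
    obtain ⟨k, hk, hkj⟩ := List.getElem_of_mem hmemp
    rw [List.any_eq_true]
    refine ⟨(j, names[j] ++ "_" ++ PySem.Int.toStr k), ?_, by simp⟩
    rw [hws]
    refine List.mem_flatMap.mpr ⟨(names[j], posA names 0 names[j]),
      List.mem_map.mpr ⟨names[j], by simp [PySem.Set.mem_ofList, List.getElem_mem], rfl⟩, ?_⟩
    refine List.mem_map.mpr ⟨((k : Int), (0 : Int) + j), ?_, by simp⟩
    exact (PySem.List.mem_enumerate_iff _ _ _).mpr ⟨k, hk, by simp [hkj]⟩
  have hfin := foldl_set_eq ws (targetT names) (List.replicate names.length "")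
    (by simp [hTlen]) hmatch
  apply List.ext_getElem?
  intro j
  rw [hfin j]
  by_cases hj : j < names.length
  · simp [hcover j hj]
  · have h1 : (targetT names)[j]? = none := List.getElem?_eq_none (by omega)
    have h2 : (List.replicate names.length ("" : String))[j]? = none :=
      List.getElem?_eq_none (by simp; omega)
    rw [h1, h2]
    split <;> rfl
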